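-- pv_equiv track=rewrite | github.com/juhaszmartin/tensorprod | file_handler.py | gen_exponents
-- ===== SOURCE A (Python) =====
-- def gen_exponents(k, n=9):
--     """Generate all exponent tuples of length n summing to k."""
--     def recurse(pos, rem, cur):
--         if pos == n - 1:
--             yield tuple(cur + [rem])
--             return
--         for e in range(rem, -1, -1):
--             yield from recurse(pos+1, rem-e, cur+[e])
--     return list(recurse(0, k, []))
-- ===== SOURCE B (Python) =====
-- def _succ(c):
--     """Next length-len(c) composition after c in descending lexicographic order."""
--     if any(c[1:-1]):
--         return (c[0],) + _succ(c[1:])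
--     return (c[0] - 1, sum(c[1:]) + 1) + (0,) * (len(c) - 2)
--
--
-- def gen_exponents(k, n=9):
--     """Generate all exponent tuples of length n summing to k."""
--     if k < 0:
--         return []
--     cur = (k,) + (0,) * (n - 1)
--     out = [cur]
--     while cur[-1] < k:
--         cur = _succ(cur)
--         out.append(cur)
--     return out
-- ===== Notes on version B (the rewrite author's own statement) =====
-- stated objective: alternative
-- what changed: Replaces A's recursive prefix-accumulating generator with an iterative successor walk: start at (k,0,...,0) and repeatedly compute the next composition in descending lexicographic order until the last entry reaches k.
-- intended difference: For k < 0 and n = 1 A returns [(k,)], a tuple with a negative exponent, while B returns [] — the intended empty enumeration of nonnegative exponent tuples, consistent with A's own [] for k < 0 at every other n. — e.g. on gen_exponents(-1, 1): A returns [[-1]], B returns []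
import Mathlib
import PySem

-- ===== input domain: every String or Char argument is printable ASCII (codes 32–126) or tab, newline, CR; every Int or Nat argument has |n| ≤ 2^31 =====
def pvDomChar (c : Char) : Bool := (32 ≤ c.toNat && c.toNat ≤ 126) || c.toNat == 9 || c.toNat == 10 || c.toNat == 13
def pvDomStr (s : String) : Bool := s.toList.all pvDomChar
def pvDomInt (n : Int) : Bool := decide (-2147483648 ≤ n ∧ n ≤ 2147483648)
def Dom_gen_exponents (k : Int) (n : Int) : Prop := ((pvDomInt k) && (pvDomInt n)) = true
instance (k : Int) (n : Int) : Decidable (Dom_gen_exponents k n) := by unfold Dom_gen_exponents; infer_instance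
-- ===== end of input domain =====

-- B replaces A's recursive prefix-accumulating generator with an iterative successor walk over
-- compositions in descending lexicographic order (alternative algorithm, similar cost).

-- ===== PORT A =====
-- A's inner generator 'recurse'; the Nat fuel bounds the recursion depth pos = 0 … n-1
-- (fuel runs out only outside Pre_, where the Python recursion never reaches pos = n-1).
def pvRecurseA (n : Int) : Nat → Int → Int → List Int → List (List Int)
  | fuel, pos, rem, cur =>
    if pos = n - 1 then [cur ++ [rem]]
    else
      match fuel with
      | 0 => []
      | fuel + 1 =>
        (PySem.List.pyRange rem (-1) (-1)).flatMap
          (fun e => pvRecurseA n fuel (pos + 1) (rem - e) (cur ++ [e]))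

def gen_exponents (k : Int) (n : Int) : List (List Int) :=
  pvRecurseA n n.toNat 0 k []

-- ===== PORT B =====
-- Source B's _succ: next composition in descending lexicographic order.
-- c[1:-1] = rest.dropLast; sum(c[1:]) = rest.sum; (0,)*(len(c)-2) = replicate (rest.length-1) 0.
-- The [] case is unreachable from gen_exponents_alt (Python would raise IndexError there).
def pvSuccAlt : List Int → List Int
  | [] => []
  | c0 :: rest =>
    if rest.dropLast.any (fun x => decide (x ≠ 0)) then
      c0 :: pvSuccAlt rest
    else
      (c0 - 1) :: (rest.sum + 1) :: List.replicate (rest.length - 1) 0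

-- Source B's while loop; cur.getLastD 0 is cur[-1] (cur is nonempty whenever the loop runs);
-- the Nat fuel bounds the number of iterations (totality only; proven sufficient below).
def pvLoopAlt (k : Int) : Nat → List Int → List (List Int) → List (List Int)
  | 0, _, out => out
  | fuel + 1, cur, out =>
    if cur.getLastD 0 < k then
      pvLoopAlt k fuel (pvSuccAlt cur) (out ++ [pvSuccAlt cur])
    else out

def gen_exponents_alt (k : Int) (n : Int) : List (List Int) :=
  if k < 0 then []
  else
    pvLoopAlt k ((k.toNat + 1) ^ n.toNat)
      (k :: List.replicate (n - 1).toNat 0)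
      [k :: List.replicate (n - 1).toNat 0]

-- ===== PRECONDITION & SPEC =====
-- Pre_ excludes exactly n ≤ 0 with 0 ≤ k, where A's recursion never reaches pos = n - 1 and
-- Python raises RecursionError (for n ≤ 0 with k < 0 A returns [], so those stay inside).
def Pre_gen_exponents (k : Int) (n : Int) : Prop := 1 ≤ n ∨ k < 0
instance (k : Int) (n : Int) : Decidable (Pre_gen_exponents k n) := by
  unfold Pre_gen_exponents; infer_instance

def pvWitness_gen_exponents : Int × Int := (3, 2)

-- For k < 0 and n = 1 A returns [(k,)], a tuple with a negative exponent, while B returns []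
-- — the intended empty enumeration of nonnegative exponent tuples, consistent with A's own []
-- for k < 0 at every other n.
def D_gen_exponents (k : Int) (n : Int) : Prop := k < 0 ∧ n = 1
instance (k : Int) (n : Int) : Decidable (D_gen_exponents k n) := by
  unfold D_gen_exponents; infer_instance

def Spec_gen_exponents (k : Int) (n : Int) (out : List (List Int)) : Prop :=
  ¬ D_gen_exponents k n → out = gen_exponents_alt k n
instance (k : Int) (n : Int) (out : List (List Int)) : Decidable (Spec_gen_exponents k n out) := by
  unfold Spec_gen_exponents; infer_instance

def pvDiffWitness_gen_exponents : Int × Int := (-1, 1)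
def pvDiffWitnessOut_gen_exponents : (List (List Int)) × (List (List Int)) := ([[-1]], [])

-- ===== CLAIM (what is proved, stated in full; the proofs are below) =====
def Claim_unchanged_gen_exponents : Prop := ∀ (k : Int) (n : Int), Dom_gen_exponents k n → Pre_gen_exponents k n → Spec_gen_exponents k n (gen_exponents k n)
def Claim_changed_gen_exponents : Prop := Dom_gen_exponents (pvDiffWitness_gen_exponents.1) (pvDiffWitness_gen_exponents.2) ∧ Pre_gen_exponents (pvDiffWitness_gen_exponents.1) (pvDiffWitness_gen_exponents.2) ∧ D_gen_exponents (pvDiffWitness_gen_exponents.1) (pvDiffWitness_gen_exponents.2) ∧ gen_exponents (pvDiffWitness_gen_exponents.1) (pvDiffWitness_gen_exponents.2) = pvDiffWitnessOut_gen_exponents.1 ∧ gen_exponents_alt (pvDiffWitness_gen_exponents.1) (pvDiffWitness_gen_exponents.2) = pvDiffWitnessOut_gen_exponents.2 ∧ pvDiffWitnessOut_gen_exponents.1 ≠ pvDiffWitnessOut_gen_exponents.2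
def Claim_exact_gen_exponents : Prop := ∀ (k : Int) (n : Int), Dom_gen_exponents k n → Pre_gen_exponents k n → D_gen_exponents k n → gen_exponents k n ≠ gen_exponents_alt k n

-- ===== LEMMAS AND PROOFS =====

-- Proof-side model of A's enumeration with the prefix stripped:
-- compA rem s = all (s+1)-tuples of nonnegative ints summing to rem, in A's order.
def compA : Int → Nat → List (List Int)
  | rem, 0 => [[rem]]
  | rem, s + 1 =>
    (PySem.List.pyRange rem (-1) (-1)).flatMap
      (fun e => (compA (rem - e) s).map (fun t => e :: t))

theorem pv_dropLast_cons {α : Type _} (a : α) (l : List α) (h : l ≠ []) :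
    (a :: l).dropLast = a :: l.dropLast := by
  cases l with | nil => simp at h | cons b m => rfl

theorem pv_getLastD_cons (a : Int) (l : List Int) (h : l ≠ []) :
    (a :: l).getLastD 0 = l.getLastD 0 := by
  cases l with
  | nil => simp at h
  | cons b m => simp [List.getLastD_eq_getLast?, List.getLast?_cons_cons]

theorem pv_getLast_eq {α : Type _} (l : List α) (h : l ≠ []) (g : α)
    (hg : l.getLast? = some g) : l.getLast h = g := by
  rw [List.getLast?_eq_some_getLast h] at hg
  exact Option.some_inj.mp hg

theorem pyRange_down_split (r : Int) (hr : 0 ≤ r) :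
    PySem.List.pyRange r (-1) (-1) = PySem.List.pyRange r 0 (-1) ++ [0] := by
  rw [PySem.List.pyRange_neg_one_eq_reverse, PySem.List.pyRange_neg_one_eq_reverse]
  rw [show (-1 : Int) + 1 = 0 by ring, show (0 : Int) + 1 = 1 by ring]
  rw [PySem.List.pyRange_one_cons (by omega)]
  simp

theorem compA_mem_ne_nil (r : Int) (s : Nat) (c : List Int) (hc : c ∈ compA r s) : c ≠ [] := by
  cases s with
  | zero => simp [compA] at hc; subst hc; simp
  | succ s =>
    rw [compA, List.mem_flatMap] at hc
    obtain ⟨e, _, hc⟩ := hc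
    rw [List.mem_map] at hc
    obtain ⟨t, _, rfl⟩ := hc
    simp

theorem compA_head (r : Int) (s : Nat) (hr : 0 ≤ r) :
    (compA r s).head? = some (r :: List.replicate s 0) := by
  induction s generalizing r with
  | zero => simp [compA]
  | succ s ih =>
    rw [compA, PySem.List.pyRange_neg_one_cons (by omega : (-1 : Int) < r), List.flatMap_cons]
    have h0 : (compA (r - r) s).head? = some ((r - r) :: List.replicate s 0) := ih _ (by omega)
    have hne : (compA (r - r) s).map (fun t => r :: t) ≠ [] := by
      intro h
      rw [List.map_eq_nil_iff] at h
      rw [h] at h0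
      simp at h0
    rw [List.head?_append_of_ne_nil _ hne, List.head?_map, h0]
    simp [List.replicate_succ]

theorem compA_ne_nil (r : Int) (s : Nat) (hr : 0 ≤ r) : compA r s ≠ [] := by
  intro h
  have := compA_head r s hr
  rw [h] at this
  simp at this

theorem compA_getLast (r : Int) (s : Nat) (hr : 0 ≤ r) :
    (compA r s).getLast? = some (List.replicate s 0 ++ [r]) := by
  induction s generalizing r with
  | zero => simp [compA]
  | succ s ih =>
    rw [compA, pyRange_down_split r hr, List.flatMap_append, List.flatMap_cons, List.flatMap_nil,
      List.append_nil]
    have h0 : (compA (r - 0) s).getLast? = some (List.replicate s 0 ++ [r - 0]) := ih _ (by omega)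
    have hne : (compA (r - 0) s).map (fun t => (0 : Int) :: t) ≠ [] := by
      intro h
      rw [List.map_eq_nil_iff] at h
      rw [h] at h0
      simp at h0
    rw [List.getLast?_append_of_ne_nil _ hne, List.getLast?_map, h0]
    simp [List.replicate_succ, sub_zero]

theorem compA_dropLast_facts (s : Nat) : ∀ (r : Int), 0 ≤ r → ∀ c ∈ (compA r s).dropLast,
    (c.dropLast.any (fun x => decide (x ≠ 0)) = true) ∧ c.getLastD 0 < r := by
  induction s with
  | zero => intro r hr c hc; simp [compA] at hc
  | succ s ih =>
    intro r hr c hc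
    rw [compA, pyRange_down_split r hr, List.flatMap_append, List.flatMap_cons, List.flatMap_nil,
      List.append_nil] at hc
    have hlastne : (compA (r - 0) s).map (fun t => (0 : Int) :: t) ≠ [] := by
      intro h
      rw [List.map_eq_nil_iff] at h
      exact compA_ne_nil (r - 0) s (by omega) h
    rw [List.dropLast_append_of_ne_nil hlastne, List.mem_append] at hc
    rcases hc with hc | hc
    · rw [List.mem_flatMap] at hc
      obtain ⟨e, he, hc⟩ := hc
      rw [PySem.List.mem_pyRange_neg_one] at he
      rw [List.mem_map] at hc
      obtain ⟨d, hd, rfl⟩ := hc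
      have hdne : d ≠ [] := compA_mem_ne_nil _ _ _ hd
      constructor
      · rw [pv_dropLast_cons e d hdne, List.any_cons]
        have : decide (e ≠ 0) = true := by simp; omega
        rw [this, Bool.true_or]
      · rw [pv_getLastD_cons e d hdne]
        have hd' := hd
        rw [← List.dropLast_concat_getLast (compA_ne_nil (r - e) s (by omega)),
          List.mem_append] at hd'
        rcases hd' with hd' | hd'
        · have := (ih (r - e) (by omega) d hd').2
          omega
        · rw [List.mem_singleton] at hd'
          have hlast := compA_getLast (r - e) s (by omega)
          have hval : (compA (r - e) s).getLast (compA_ne_nil (r - e) s (by omega)) =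
              List.replicate s 0 ++ [r - e] :=
            pv_getLast_eq _ _ _ hlast
          rw [hd', hval, List.getLastD_eq_getLast?, List.getLast?_concat]
          simp
          omega
    · rw [← List.map_dropLast, List.mem_map] at hc
      obtain ⟨d, hd, rfl⟩ := hc
      obtain ⟨ha, hl⟩ := ih (r - 0) (by omega) d hd
      have hdne : d ≠ [] := compA_mem_ne_nil _ _ _ (List.mem_of_mem_dropLast hd)
      constructor
      · rw [pv_dropLast_cons _ d hdne, List.any_cons, ha]
        simp
      · rw [pv_getLastD_cons _ d hdne]
        omega

theorem compA_chain (s : Nat) : ∀ (r : Int), 0 ≤ r →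
    List.IsChain (fun a b => pvSuccAlt a = b) (compA r s) := by
  induction s with
  | zero => intro r hr; simp [compA]
  | succ s ih =>
    intro r hr
    rw [compA, List.flatMap_def]
    have hnotmem : [] ∉ (PySem.List.pyRange r (-1) (-1)).map
        (fun e => (compA (r - e) s).map (fun t => e :: t)) := by
      intro hmem
      rw [List.mem_map] at hmem
      obtain ⟨e, he, hfe⟩ := hmem
      rw [PySem.List.mem_pyRange_neg_one] at he
      rw [List.map_eq_nil_iff] at hfe
      exact compA_ne_nil (r - e) s (by omega) hfe
    rw [List.isChain_flatten hnotmem]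
    constructor
    · intro l hl
      rw [List.mem_map] at hl
      obtain ⟨e, he, rfl⟩ := hl
      rw [PySem.List.mem_pyRange_neg_one] at he
      rw [List.isChain_map]
      rw [List.isChain_iff_getElem]
      intro i hi
      have hchain := ih (r - e) (by omega)
      rw [List.isChain_iff_getElem] at hchain
      have hsucc := hchain i hi
      have hmem : (compA (r - e) s)[i] ∈ (compA (r - e) s).dropLast := by
        have hlen : i < (compA (r - e) s).dropLast.length := by
          rw [List.length_dropLast]; omega
        have hgd : ((compA (r - e) s).dropLast)[i]'hlen = (compA (r - e) s)[i]'(by omega) := by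
          simp [List.getElem_dropLast]
        rw [← hgd]
        exact List.getElem_mem hlen
      have hb := (compA_dropLast_facts s (r - e) (by omega) _ hmem).1
      show pvSuccAlt (e :: (compA (r - e) s)[i]) = e :: (compA (r - e) s)[i + 1]
      rw [pvSuccAlt, if_pos hb, hsucc]
    · rw [List.isChain_map]
      have aux : ∀ (j : Nat), (j : Int) ≤ r →
          List.IsChain (fun e e' : Int =>
            ∀ x ∈ ((compA (r - e) s).map (fun t => e :: t)).getLast?,
            ∀ y ∈ ((compA (r - e') s).map (fun t => e' :: t)).head?, pvSuccAlt x = y)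
            (PySem.List.pyRange (j : Int) (-1) (-1)) := by
        intro j
        induction j with
        | zero =>
          intro _
          rw [PySem.List.pyRange_neg_one_cons (by omega : (-1 : Int) < (0 : Nat))]
          rw [show ((0 : Nat) : Int) - 1 = -1 by omega]
          rw [PySem.List.pyRange_neg_one_eq_nil (by omega)]
          simp
        | succ j ihj =>
          intro hj
          have hc1 : ((j + 1 : Nat) : Int) = (j : Int) + 1 := by push_cast; ring
          rw [PySem.List.pyRange_neg_one_cons (by omega : (-1 : Int) < ((j + 1 : Nat) : Int))]
          rw [show ((j + 1 : Nat) : Int) - 1 = (j : Int) by omega]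
          rw [PySem.List.pyRange_neg_one_cons (by omega : (-1 : Int) < (j : Int))]
          have ihj' := ihj (by omega)
          rw [PySem.List.pyRange_neg_one_cons (by omega : (-1 : Int) < (j : Int))] at ihj'
          refine List.isChain_cons_cons.mpr ⟨?_, ihj'⟩
          intro x hx y hy
          set e : Int := ((j + 1 : Nat) : Int) with hedef
          have he1 : 1 ≤ e := by omega
          have her : e ≤ r := by omega
          rw [List.getLast?_map, compA_getLast (r - e) s (by omega)] at hx
          simp only [Option.map_some, Option.mem_def, Option.some_inj] at hx
          rw [List.head?_map, compA_head (r - (j : Int)) s (by omega)] at hy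
          simp only [Option.map_some, Option.mem_def, Option.some_inj] at hy
          subst hx
          subst hy
          rw [pvSuccAlt]
          have hcond : (List.replicate s 0 ++ [r - e]).dropLast.any
              (fun x => decide (x ≠ 0)) = false := by
            rw [List.dropLast_concat]
            rw [List.any_eq_false]
            intro x hxx
            rw [List.mem_replicate] at hxx
            simp [hxx.2]
          rw [hcond]
          simp only [Bool.false_eq_true, if_false]
          have hsum : (List.replicate s (0 : Int) ++ [r - e]).sum = r - e := by
            rw [List.sum_append, List.sum_replicate]
            simp
          have hlen : (List.replicate s (0 : Int) ++ [r - e]).length - 1 = s := by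
            rw [List.length_append, List.length_replicate]
            simp
          rw [hsum, hlen]
          have : r - e + 1 = r - (j : Int) := by omega
          rw [this, show e - 1 = (j : Int) by omega]
      have hto : r = ((r.toNat : Nat) : Int) := by omega
      rw [hto]
      have := aux r.toNat (by omega)
      convert this using 3 <;> rw [← hto]

theorem compA_length_le (s : Nat) : ∀ (r : Int),
    (compA r s).length ≤ (r.toNat + 1) ^ (s + 1) := by
  induction s with
  | zero =>
    intro r
    have h1 : (compA r 0).length = 1 := by simp [compA]
    rw [h1]
    exact Nat.one_le_pow _ _ (by omega)
  | succ s ih =>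
    intro r
    by_cases hr : r < 0
    · rw [compA, PySem.List.pyRange_neg_one_eq_nil (by omega)]
      simp
    · push Not at hr
      rw [compA, List.length_flatMap]
      have hb : ∀ x ∈ (PySem.List.pyRange r (-1) (-1)).map
          (fun e => ((compA (r - e) s).map (fun t => e :: t)).length),
          x ≤ (r.toNat + 1) ^ (s + 1) := by
        intro x hx
        rw [List.mem_map] at hx
        obtain ⟨e, he, rfl⟩ := hx
        rw [PySem.List.mem_pyRange_neg_one] at he
        rw [List.length_map]
        calc (compA (r - e) s).length ≤ ((r - e).toNat + 1) ^ (s + 1) := ih (r - e)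
          _ ≤ (r.toNat + 1) ^ (s + 1) := Nat.pow_le_pow_left (by omega) _
      have hsum := List.sum_le_card_nsmul _ _ hb
      rw [smul_eq_mul, List.length_map, PySem.List.length_pyRange_neg_one] at hsum
      calc ((PySem.List.pyRange r (-1) (-1)).map
            (fun e => ((compA (r - e) s).map (fun t => e :: t)).length)).sum
          ≤ (r - (-1)).toNat * (r.toNat + 1) ^ (s + 1) := hsum
        _ ≤ (r.toNat + 1) * (r.toNat + 1) ^ (s + 1) := by
            apply Nat.mul_le_mul_right
            omega
        _ = (r.toNat + 1) ^ (s + 1 + 1) := by ring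

theorem loopAlt_unroll (kk : Int) (rest : List (List Int)) :
    ∀ (c : List Int) (out : List (List Int)) (fuel : Nat),
      List.IsChain (fun a b => pvSuccAlt a = b) (c :: rest) →
      (∀ x ∈ (c :: rest).dropLast, x.getLastD 0 < kk) →
      ((c :: rest).getLast (by simp)).getLastD 0 = kk →
      rest.length ≤ fuel →
      pvLoopAlt kk fuel c out = out ++ rest := by
  induction rest with
  | nil =>
    intro c out fuel _ _ hlast _
    simp only [List.getLast_singleton] at hlast
    cases fuel with
    | zero => simp [pvLoopAlt]
    | succ f =>
      have hc : ¬ c.getLastD 0 < kk := by omega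
      simp only [pvLoopAlt, if_neg hc, List.append_nil]
  | cons c' rest' ih =>
    intro c out fuel hchain hdrop hlast hfuel
    cases fuel with
    | zero => simp at hfuel
    | succ f =>
      have hcond : c.getLastD 0 < kk := by
        apply hdrop
        rw [pv_dropLast_cons c (c' :: rest') (by simp)]
        exact List.mem_cons_self
      have hsucc : pvSuccAlt c = c' := (List.isChain_cons_cons.mp hchain).1
      rw [pvLoopAlt, if_pos hcond, hsucc]
      rw [ih c' (out ++ [c']) f (List.isChain_cons_cons.mp hchain).2 ?hdrop ?hlast (by
        simp at hfuel ⊢; omega)]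
      · simp
      case hdrop =>
        intro x hx
        apply hdrop
        rw [pv_dropLast_cons c (c' :: rest') (by simp)]
        exact List.mem_cons_of_mem _ hx
      case hlast =>
        rw [← hlast, List.getLast_cons (by simp : c' :: rest' ≠ [])]

theorem recurseA_eq_compA (n : Int) (s : Nat) :
    ∀ (fuel : Nat) (pos rem : Int) (cur : List Int), s ≤ fuel → pos = n - 1 - s →
      pvRecurseA n fuel pos rem cur = (compA rem s).map (fun t => cur ++ t) := by
  induction s with
  | zero =>
    intro fuel pos rem cur _ hpos
    have hp : pos = n - 1 := by omega
    cases fuel with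
    | zero => rw [pvRecurseA, if_pos hp]; simp [compA]
    | succ f => rw [pvRecurseA, if_pos hp]; simp [compA]
  | succ s ih =>
    intro fuel pos rem cur hfuel hpos
    have hne : ¬ pos = n - 1 := by
      intro h
      rw [h] at hpos
      omega
    cases fuel with
    | zero => omega
    | succ f =>
      rw [pvRecurseA, if_neg hne]
      have hfun : ∀ e : Int, pvRecurseA n f (pos + 1) (rem - e) (cur ++ [e]) =
          (compA (rem - e) s).map (fun t => (cur ++ [e]) ++ t) := by
        intro e
        apply ih f (pos + 1) (rem - e) (cur ++ [e]) (by omega)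
        omega
      rw [compA, List.map_flatMap]
      simp only [hfun, List.map_map]
      congr 1
      funext e
      congr 1
      funext t
      simp

theorem main_eq (k n : Int) (hk : 0 ≤ k) (hn : 1 ≤ n) :
    gen_exponents k n = gen_exponents_alt k n := by
  have hs : n.toNat = (n - 1).toNat + 1 := by omega
  unfold gen_exponents
  rw [recurseA_eq_compA n (n - 1).toNat n.toNat 0 k [] (by omega) (by omega)]
  simp only [List.nil_append, List.map_id_fun', id]
  unfold gen_exponents_alt
  rw [if_neg (by omega)]
  have hhead := compA_head k (n - 1).toNat hk
  have hne := compA_ne_nil k (n - 1).toNat hk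
  obtain ⟨c0, tail, hL⟩ : ∃ c0 tail, compA k (n - 1).toNat = c0 :: tail := by
    cases h : compA k (n - 1).toNat with
    | nil => exact absurd h hne
    | cons a t => exact ⟨a, t, rfl⟩
  have hc0 : c0 = k :: List.replicate (n - 1).toNat 0 := by
    rw [hL] at hhead
    simpa using hhead
  rw [hL, ← hc0]
  have hchain : List.IsChain (fun a b => pvSuccAlt a = b) (c0 :: tail) := by
    rw [← hL]; exact compA_chain (n - 1).toNat k hk
  have hdrop : ∀ x ∈ (c0 :: tail).dropLast, x.getLastD 0 < k := by
    intro x hx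
    rw [← hL] at hx
    exact (compA_dropLast_facts (n - 1).toNat k hk x hx).2
  have hlastv : (c0 :: tail).getLast (by simp) =
      List.replicate (n - 1).toNat 0 ++ [k] := by
    apply pv_getLast_eq
    rw [← hL]
    exact compA_getLast k (n - 1).toNat hk
  have hlast : ((c0 :: tail).getLast (by simp)).getLastD 0 = k := by
    rw [hlastv, List.getLastD_eq_getLast?, List.getLast?_concat]
    simp
  have hlen : tail.length ≤ (k.toNat + 1) ^ n.toNat := by
    have hle := compA_length_le (n - 1).toNat k
    rw [hL] at hle
    simp only [List.length_cons] at hle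
    rw [hs]
    omega
  rw [loopAlt_unroll k tail c0 [c0] ((k.toNat + 1) ^ n.toNat) hchain hdrop hlast hlen]
  simp

-- ===== VERDICT (by name: the statement is the Claim_ definition above) =====
theorem gen_exponents_spec : Claim_unchanged_gen_exponents := by
  intro k n _ hpre
  unfold Spec_gen_exponents
  intro hnd
  by_cases hk : 0 ≤ k
  · have hn : 1 ≤ n := by
      unfold Pre_gen_exponents at hpre
      rcases hpre with h | h
      · exact h
      · omega
    exact main_eq k n hk hn
  · push Not at hk
    have hn1 : n ≠ 1 := by
      intro h
      exact hnd ⟨hk, h⟩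
    unfold gen_exponents gen_exponents_alt
    rw [if_pos hk]
    by_cases hn : 1 ≤ n
    · obtain ⟨t, ht⟩ : ∃ t, n.toNat = t + 1 := ⟨n.toNat - 1, by omega⟩
      rw [ht, pvRecurseA, if_neg (by omega : ¬ (0 : Int) = n - 1)]
      rw [PySem.List.pyRange_neg_one_eq_nil (by omega)]
      simp
    · have ht : n.toNat = 0 := by omega
      rw [ht, pvRecurseA, if_neg (by omega : ¬ (0 : Int) = n - 1)]

theorem gen_exponents_changed : Claim_changed_gen_exponents := by
  unfold Claim_changed_gen_exponents; decide

theorem gen_exponents_tight : Claim_exact_gen_exponents := by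
  intro k n _ _ hd
  unfold D_gen_exponents at hd
  obtain ⟨hk, hn⟩ := hd
  subst hn
  unfold gen_exponents gen_exponents_alt
  rw [if_pos hk]
  rw [show (1 : Int).toNat = 1 from rfl, pvRecurseA, if_pos (by omega : (0 : Int) = 1 - 1)]
  simp
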